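-- pv_equiv track=rewrite | github.com/Ecolosseum/codecon | Ansh/code.py | midline
-- ===== SOURCE A (Python) =====
-- def midline(n,zero=False):
--     S = "*"
--     for i in range(0,n-2):
--         if (i + 1) == (n-1)/2 and zero:
--               S += "0"
--         else:
--             S += " "
--     S += "*"
--     return S
-- ===== SOURCE B (Python) =====
-- def midline(n, zero=False):
--     body = " " * max(n - 2, 0)
--     s = "*" + body + "*"
--     if zero and n >= 3 and n % 2 == 1:
--         p = (n - 1) // 2
--         s = s[:p] + "0" + s[p + 1:]
--     return s
-- ===== Notes on version B (the rewrite author's own statement) =====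
-- stated objective: simpler
-- what changed: B builds the body in one step as '*' + ' '*(n-2) + '*' and, only when a zero is needed (zero set, n >= 3 and n odd), overwrites the middle character by slicing at (n-1)//2, instead of A's per-character loop testing a float equality at every index; the bulk string repetition also makes it measurably faster.
import Mathlib
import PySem

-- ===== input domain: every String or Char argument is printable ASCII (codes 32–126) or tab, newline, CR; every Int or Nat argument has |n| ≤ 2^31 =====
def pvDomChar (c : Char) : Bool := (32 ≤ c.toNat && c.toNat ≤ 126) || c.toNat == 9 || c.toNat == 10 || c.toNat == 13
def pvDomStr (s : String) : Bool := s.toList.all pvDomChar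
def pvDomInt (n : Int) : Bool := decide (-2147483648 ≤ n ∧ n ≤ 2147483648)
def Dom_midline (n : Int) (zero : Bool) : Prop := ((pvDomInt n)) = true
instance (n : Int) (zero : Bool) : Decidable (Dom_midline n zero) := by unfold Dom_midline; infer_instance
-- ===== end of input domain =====

-- B builds the bordered line in one step ("*" + " "*(n-2) + "*") and patches the single '0' in by
-- slicing only when needed, instead of A's per-character loop; same return value on all inputs.

-- ===== PORT A =====
-- Python's `(i + 1) == (n - 1)/2` is a float comparison; for |n| ≤ 2^31 (the Dom bound) both n - 1
-- and (n - 1)/2 are exactly representable, so the test is exact and holds iff 2*(i+1) = n-1.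
def midlineCharsA (n : Int) (zero : Bool) : List Char :=
  ((PySem.List.pyRange 0 (n - 2) 1).foldl
    (fun S i => S ++ [if 2 * (i + 1) = n - 1 ∧ zero then '0' else ' '])
    ['*']) ++ ['*']

def midline (n : Int) (zero : Bool) : String := String.ofList (midlineCharsA n zero)

-- ===== PORT B =====
def midlineCharsB (n : Int) (zero : Bool) : List Char :=
  let body : List Char := List.replicate (max (n - 2) 0).toNat ' '
  let s : List Char := ['*'] ++ body ++ ['*']
  if zero ∧ 3 ≤ n ∧ PySem.Int.mod n 2 = 1 then
    let p : Int := PySem.Int.floordiv (n - 1) 2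
    PySem.List.slice s none (some p) ++ ['0'] ++ PySem.List.slice s (some (p + 1)) none
  else s

def midline_alt (n : Int) (zero : Bool) : String := String.ofList (midlineCharsB n zero)

-- ===== PRECONDITION & SPEC =====
def Spec_midline (n : Int) (zero : Bool) (out : String) : Prop := out = midline_alt n zero
instance (n : Int) (zero : Bool) (out : String) : Decidable (Spec_midline n zero out) := by unfold Spec_midline; infer_instance

-- ===== CLAIM (what is proved, stated in full; the proofs are below) =====
def Claim_equal_midline : Prop := ∀ (n : Int) (zero : Bool), Dom_midline n zero → Spec_midline n zero (midline n zero)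

-- ===== LEMMAS AND PROOFS =====

-- A's loop, unrolled by the library lemma: border ++ one mapped character per range element.
theorem midlineCharsA_eq_map (n : Int) (zero : Bool) :
    midlineCharsA n zero =
      '*' :: ((PySem.List.pyRange 0 (n - 2) 1).map
        (fun i => if 2 * (i + 1) = n - 1 ∧ zero then '0' else ' ')) ++ ['*'] := by
  simp only [midlineCharsA, PySem.List.foldl_append_singleton_eq_map]
  rfl

-- a range-map with a single '0' at index j is two blocks of spaces around it
theorem map_range_ite (N j : Nat) (hj : j < N) :
    (List.range N).map (fun k => if k = j then '0' else ' ') =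
      List.replicate j ' ' ++ '0' :: List.replicate (N-1-j) ' ' := by
  apply List.ext_getElem
  · simp; omega
  · intro i h1 h2
    simp only [List.getElem_map, List.getElem_range]
    rcases lt_trichotomy i j with h | h | h
    · rw [List.getElem_append_left (by simpa using h)]
      simp [Nat.ne_of_lt h]
    · subst h; rw [List.getElem_append_right (by simp)]; simp
    · rw [List.getElem_append_right (by simp; omega)]
      simp [List.getElem_cons, Nat.ne_of_gt h, show i - j ≠ 0 by omega]

theorem chars_eq (n : Int) (zero : Bool) :
    midlineCharsA n zero = midlineCharsB n zero := by
  rw [midlineCharsA_eq_map]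
  unfold midlineCharsB
  by_cases h3 : 3 ≤ n
  · by_cases hcond : zero = true ∧ PySem.Int.mod n 2 = 1
    · -- zero requested and n odd: the loop writes '0' exactly at index (n-1)/2
      rw [if_pos ⟨hcond.1, h3, hcond.2⟩]
      have hmod : n % 2 = 1 := by
        have := hcond.2; rwa [PySem.Int.mod_eq_emod_of_pos (by norm_num)] at this
      obtain ⟨m, hm, hm1⟩ : ∃ m : Nat, n = 2*(m:Int)+1 ∧ 1 ≤ m := ⟨((n-1)/2).toNat, by omega, by omega⟩
      have hN : n - 2 = ((2*m-1 : Nat) : Int) := by omega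
      have hp : PySem.Int.floordiv (n - 1) 2 = (m : Int) := by
        rw [PySem.Int.floordiv_eq_ediv_of_pos (by norm_num)]; omega
      simp only [hp, hN, PySem.List.pyRange_zero_nat, List.map_map]
      have hmax : (max ((2*m-1:Nat):Int) 0).toNat = 2*m-1 := by omega
      rw [hmax]
      have hcast : ((m:Int) + 1) = ((m+1 : Nat) : Int) := by push_cast; ring
      rw [hcast, PySem.List.slice_to_natCast, PySem.List.slice_from_natCast]
      rw [List.map_congr_left (g := fun k => if k = m-1 then '0' else ' ')
          (by intro k hk; simp only [Function.comp_apply]; by_cases h : k = m - 1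
              · simp [h]; constructor
                · omega
                · exact hcond.1
              · rw [if_neg h, if_neg]; rintro ⟨hh, -⟩; omega)]
      rw [map_range_ite _ (m-1) (by omega)]
      have h1 : 2*m-1-1-(m-1) = m-1 := by omega
      simp only [List.cons_append, List.nil_append, List.append_assoc]
      have htake : List.take m ('*' :: (List.replicate (2*m-1) ' ' ++ ['*']))
          = '*' :: List.replicate (m-1) ' ' := by
        rw [List.take_cons (by omega),
            List.take_append_of_le_length (by simp only [List.length_replicate]; omega),
            List.take_replicate]
        congr 2
        omega
      have hdrop : List.drop (m+1) ('*' :: (List.replicate (2*m-1) ' ' ++ ['*']))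
          = List.replicate (m-1) ' ' ++ ['*'] := by
        rw [List.drop_succ_cons,
            List.drop_append_of_le_length (by simp only [List.length_replicate]; omega),
            List.drop_replicate]
        congr 2
        omega
      rw [h1, htake, hdrop]
      simp
    · -- no zero (flag unset, or n even so the float test never fires): all-space body
      rw [if_neg (fun h => hcond ⟨h.1, h.2.2⟩)]
      have hN : n - 2 = (((n-2).toNat : Nat) : Int) := by omega
      rw [hN, PySem.List.pyRange_zero_nat, List.map_map]
      rw [List.map_congr_left (g := fun _ => ' ')
          (by intro k hk
              simp only [Function.comp_apply]
              rw [if_neg]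
              rintro ⟨hh, hz⟩
              rcases hcond with hcond
              by_cases hzz : zero = true
              · have : PySem.Int.mod n 2 = 1 := by
                  rw [PySem.Int.mod_eq_emod_of_pos (by norm_num)]; omega
                exact hcond ⟨hzz, this⟩
              · exact hzz hz)]
      have hmax : (max (n-2) 0).toNat = (n-2).toNat := by omega
      simp [hmax, List.map_const']
  · -- n < 3: empty range, no zero possible
    rw [PySem.List.pyRange_one_eq_nil (by omega)]
    rw [if_neg (by rintro ⟨-, h, -⟩; exact h3 h)]
    have hmax : max (n - 2) 0 = 0 := by omega
    simp [hmax]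

-- ===== VERDICT (by name: the statement is the Claim_ definition above) =====
theorem midline_spec : Claim_equal_midline := by
  intro n zero _
  unfold Spec_midline midline midline_alt
  rw [chars_eq]
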